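-- pv_equiv track=rewrite | github.com/alexandraback/datacollection | solutions_5639104758808576_1/Python/Fulcrum/a.py | solve
-- ===== SOURCE A (Python) =====
-- def solve(fingerprint):
--     extra = 0
--     current_standing = 0
--
--     for shyness, count in enumerate(fingerprint):
--         if shyness <= current_standing:
--             current_standing += count
--         else:
--             extra += (shyness - current_standing)
--             current_standing = shyness + count
--
--     return extra
-- ===== SOURCE B (Python) =====
-- def solve(fingerprint):
--     # Stage 1: exclusive prefix sums of the counts.
--     prefixes = []
--     total = 0
--     for count in fingerprint:
--         prefixes.append(total)
--         total += count
--     # Stage 2: the answer is the largest deficit i - prefix (at least 0).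
--     deficits = [i - p for i, p in enumerate(prefixes)]
--     return max([0] + deficits)
-- ===== Notes on version B (the rewrite author's own statement) =====
-- stated objective: alternative
-- what changed: Replaces A's single coupled current_standing/extra feedback simulation by three staged passes: build the list of exclusive prefix sums, map it to the deficits i - prefix, and take the maximum of the deficits and 0, using the invariant current_standing = prefix + extra.
import Mathlib
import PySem

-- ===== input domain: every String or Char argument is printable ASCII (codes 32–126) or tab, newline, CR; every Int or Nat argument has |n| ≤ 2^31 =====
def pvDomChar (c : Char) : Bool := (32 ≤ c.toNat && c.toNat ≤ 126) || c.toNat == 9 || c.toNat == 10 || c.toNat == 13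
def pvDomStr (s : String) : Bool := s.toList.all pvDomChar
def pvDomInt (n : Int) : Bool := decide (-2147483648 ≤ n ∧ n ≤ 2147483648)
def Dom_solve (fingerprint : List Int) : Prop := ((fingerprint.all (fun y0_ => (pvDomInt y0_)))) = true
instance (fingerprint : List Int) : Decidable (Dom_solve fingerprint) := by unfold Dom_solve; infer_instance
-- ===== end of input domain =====

-- B replaces A's single coupled standing/extra simulation by staged passes:
-- exclusive prefix sums, then the deficit list, then a maximum (objective: alternative).

-- ===== PORT A =====
-- state (extra, current_standing); branch jumps the standing exactly as in the Python
def solve (fingerprint : List Int) : Int :=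
  ((PySem.List.enumerate fingerprint 0).foldl
    (fun (st : Int × Int) p =>
      if p.1 ≤ st.2 then (st.1, st.2 + p.2)
      else (st.1 + (p.1 - st.2), p.1 + p.2))
    (0, 0)).1

-- ===== PORT B =====
-- Stage 1 of Source B: the list of exclusive prefix sums (append total, then total += count)
def bPrefixes : List Int → Int → List Int
  | [], _ => []
  | count :: rest, total => total :: bPrefixes rest (total + count)

-- Stage 2/3 of Source B: deficits i - p over the enumerated prefixes, then max([0] + deficits)
def solve_alt (fingerprint : List Int) : Int :=
  (((PySem.List.enumerate (bPrefixes fingerprint 0) 0).map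
      (fun p => p.1 - p.2))).foldl max 0

-- ===== PRECONDITION & SPEC =====
def Spec_solve (fingerprint : List Int) (out : Int) : Prop := out = solve_alt fingerprint
instance (fingerprint : List Int) (out : Int) : Decidable (Spec_solve fingerprint out) := by unfold Spec_solve; infer_instance

-- ===== CLAIM (what is proved, stated in full; the proofs are below) =====
def Claim_equal_solve : Prop := ∀ (fingerprint : List Int), Dom_solve fingerprint → Spec_solve fingerprint (solve fingerprint)

-- ===== LEMMAS AND PROOFS =====

-- invariant: A's current_standing = prefix + extra, and A's extra is the running max of deficits
theorem solve_loop_eq : ∀ (l : List Int) (n e pfx : Int),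
    ((PySem.List.enumerate l n).foldl
      (fun (st : Int × Int) p =>
        if p.1 ≤ st.2 then (st.1, st.2 + p.2)
        else (st.1 + (p.1 - st.2), p.1 + p.2)) (e, pfx + e)).1
    = ((PySem.List.enumerate (bPrefixes l pfx) n).map (fun p => p.1 - p.2)).foldl max e := by
  intro l
  induction l with
  | nil => intro n e pfx; simp [PySem.List.enumerate_nil, bPrefixes]
  | cons c l ih =>
    intro n e pfx
    simp only [bPrefixes, PySem.List.enumerate_cons, List.foldl_cons, List.map_cons]
    by_cases h : n ≤ pfx + e
    · have hm : max e (n - pfx) = e := by omega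
      rw [if_pos h, hm]
      have := ih (n + 1) e (pfx + c)
      calc ((PySem.List.enumerate l (n + 1)).foldl
              (fun (st : Int × Int) p =>
                if p.1 ≤ st.2 then (st.1, st.2 + p.2)
                else (st.1 + (p.1 - st.2), p.1 + p.2)) (e, pfx + e + c)).1
          = ((PySem.List.enumerate l (n + 1)).foldl
              (fun (st : Int × Int) p =>
                if p.1 ≤ st.2 then (st.1, st.2 + p.2)
                else (st.1 + (p.1 - st.2), p.1 + p.2)) (e, (pfx + c) + e)).1 := by ring_nf
        _ = _ := this
    · have hm : max e (n - pfx) = n - pfx := by omega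
      rw [if_neg h, hm]
      have := ih (n + 1) (n - pfx) (pfx + c)
      calc ((PySem.List.enumerate l (n + 1)).foldl
              (fun (st : Int × Int) p =>
                if p.1 ≤ st.2 then (st.1, st.2 + p.2)
                else (st.1 + (p.1 - st.2), p.1 + p.2)) (e + (n - (pfx + e)), n + c)).1
          = ((PySem.List.enumerate l (n + 1)).foldl
              (fun (st : Int × Int) p =>
                if p.1 ≤ st.2 then (st.1, st.2 + p.2)
                else (st.1 + (p.1 - st.2), p.1 + p.2)) ((n - pfx), (pfx + c) + (n - pfx))).1 := by
              ring_nf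
        _ = _ := this

-- ===== VERDICT (by name: the statement is the Claim_ definition above) =====
theorem solve_spec : Claim_equal_solve := by
  intro fingerprint _
  unfold Spec_solve solve solve_alt
  have := solve_loop_eq fingerprint 0 0 0
  simpa using this
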